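-- pv_equiv track=rewrite | github.com/openforcefield/openff-evaluator | openff/evaluator/datasets/curation/components/tautomers.py | _apply_suppression
-- ===== SOURCE A (Python) =====
-- from enum import Enum
-- from typing import Dict, FrozenSet, Iterable, Optional, Tuple
--
-- class TautomerCategory(str, Enum):
--     BETA_DIKETONE = "BETA_DIKETONE"
--     KETO_ENOL_ALIPHATIC = "KETO_ENOL_ALIPHATIC"
--     KETO_ENOL_CYCLIC = "KETO_ENOL_CYCLIC"
--     THIOKETONE_THIOL_ALIPHATIC = "THIOKETONE_THIOL_ALIPHATIC"
--     KETO_ENOL_AROMATIC = "KETO_ENOL_AROMATIC"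
--     IMINE_ENAMINE_SECONDARY = "IMINE_ENAMINE_SECONDARY"
--     IMINE_ENAMINE_PRIMARY = "IMINE_ENAMINE_PRIMARY"
--     ALPHA_AMINO_ACID = "ALPHA_AMINO_ACID"
--     ANNULAR_AZOLE = "ANNULAR_AZOLE"
--     LACTAM_LACTIM = "LACTAM_LACTIM"
--     AMIDE_IMIDIC_ACID = "AMIDE_IMIDIC_ACID"
--     OXIME_NITROSO = "OXIME_NITROSO"
--     KETENE_YNOL = "KETENE_YNOL"
--     CARBOXYLIC_ACID_ENOL = "CARBOXYLIC_ACID_ENOL"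
--     ESTER_ENOL = "ESTER_ENOL"
--     AMIDE_ENOL = "AMIDE_ENOL"
--
-- _SUPPRESSED_CATEGORY_MATCHES = {
--     TautomerCategory.BETA_DIKETONE: frozenset(
--         {
--             TautomerCategory.KETO_ENOL_ALIPHATIC,
--             # beta-keto acids and beta-keto esters should be classified as
--             # BETA_DIKETONE, not as CARBOXYLIC_ACID_ENOL / ESTER_ENOL.
--             # LW: I tried for some time and could not generalize exclusive SMARTS,
--             # nor could Claude, so this seemed easier
--             TautomerCategory.CARBOXYLIC_ACID_ENOL,
--             TautomerCategory.ESTER_ENOL,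
--         }
--     ),
--     TautomerCategory.AMIDE_IMIDIC_ACID: frozenset(
--         {
--             TautomerCategory.IMINE_ENAMINE_PRIMARY,
--             TautomerCategory.KETO_ENOL_ALIPHATIC,
--             TautomerCategory.IMINE_ENAMINE_SECONDARY,
--             TautomerCategory.AMIDE_ENOL,
--             # quite a few things matching the elementary amide pattern
--         }
--     ),
-- }
--
-- def _apply_suppression(
--     matched: FrozenSet[TautomerCategory],
-- ) -> FrozenSet[TautomerCategory]:
--     result = set(matched)
--     for category, suppressed in _SUPPRESSED_CATEGORY_MATCHES.items():
--         if category in result: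
--             result.difference_update(suppressed)
--     return frozenset(result)
-- ===== SOURCE B (Python) =====
-- from enum import Enum
-- from typing import Dict, FrozenSet, Iterable, Optional, Tuple
--
-- class TautomerCategory(str, Enum):
--     BETA_DIKETONE = "BETA_DIKETONE"
--     KETO_ENOL_ALIPHATIC = "KETO_ENOL_ALIPHATIC"
--     KETO_ENOL_CYCLIC = "KETO_ENOL_CYCLIC"
--     THIOKETONE_THIOL_ALIPHATIC = "THIOKETONE_THIOL_ALIPHATIC"
--     KETO_ENOL_AROMATIC = "KETO_ENOL_AROMATIC"
--     IMINE_ENAMINE_SECONDARY = "IMINE_ENAMINE_SECONDARY"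
--     IMINE_ENAMINE_PRIMARY = "IMINE_ENAMINE_PRIMARY"
--     ALPHA_AMINO_ACID = "ALPHA_AMINO_ACID"
--     ANNULAR_AZOLE = "ANNULAR_AZOLE"
--     LACTAM_LACTIM = "LACTAM_LACTIM"
--     AMIDE_IMIDIC_ACID = "AMIDE_IMIDIC_ACID"
--     OXIME_NITROSO = "OXIME_NITROSO"
--     KETENE_YNOL = "KETENE_YNOL"
--     CARBOXYLIC_ACID_ENOL = "CARBOXYLIC_ACID_ENOL"
--     ESTER_ENOL = "ESTER_ENOL"
--     AMIDE_ENOL = "AMIDE_ENOL"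
--
-- # Inverted index of the suppression rules: for each suppressible category,
-- # the dominant categories whose presence suppresses it.  (This is the inverse
-- # of A's dominant -> suppressed-set table.)
-- _SUPPRESSORS = {
--     TautomerCategory.KETO_ENOL_ALIPHATIC: (
--         TautomerCategory.BETA_DIKETONE,
--         TautomerCategory.AMIDE_IMIDIC_ACID,
--     ),
--     TautomerCategory.CARBOXYLIC_ACID_ENOL: (TautomerCategory.BETA_DIKETONE,),
--     TautomerCategory.ESTER_ENOL: (TautomerCategory.BETA_DIKETONE,),
--     TautomerCategory.IMINE_ENAMINE_PRIMARY: (TautomerCategory.AMIDE_IMIDIC_ACID,),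
--     TautomerCategory.IMINE_ENAMINE_SECONDARY: (TautomerCategory.AMIDE_IMIDIC_ACID,),
--     TautomerCategory.AMIDE_ENOL: (TautomerCategory.AMIDE_IMIDIC_ACID,),
-- }
--
-- def _apply_suppression(matched):
--     # keep a category unless one of its (inverted-index) suppressors is present;
--     # correct because no dominant category is itself suppressible.
--     return frozenset(
--         c for c in matched
--         if not any(d in matched for d in _SUPPRESSORS.get(c, ()))
--     )
-- ===== Notes on version B (the rewrite author's own statement) =====
-- stated objective: alternative
-- what changed: B inverts the rule table into a suppressed-category -> dominant-suppressors index built once, and decides each matched element by a single lookup (keep c unless a suppressor of c is present), eliminating A's loop over dominant rules with in-place set mutation.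
import Mathlib
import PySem

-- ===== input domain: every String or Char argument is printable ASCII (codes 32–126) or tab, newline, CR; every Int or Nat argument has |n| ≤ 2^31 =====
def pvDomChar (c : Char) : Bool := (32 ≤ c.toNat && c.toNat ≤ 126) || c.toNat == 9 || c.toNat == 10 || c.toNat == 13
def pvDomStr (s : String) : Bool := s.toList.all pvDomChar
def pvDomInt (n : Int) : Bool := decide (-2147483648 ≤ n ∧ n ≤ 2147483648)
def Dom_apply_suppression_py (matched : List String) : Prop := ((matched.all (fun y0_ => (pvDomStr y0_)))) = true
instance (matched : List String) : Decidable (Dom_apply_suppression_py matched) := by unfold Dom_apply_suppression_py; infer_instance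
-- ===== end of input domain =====

-- B inverts the rule table into a suppressed->suppressors index and filters matched element-wise by one lookup; alternative decomposition, same results.

-- ===== PORT A =====
-- _SUPPRESSED_CATEGORY_MATCHES as an association list (dict insertion order)
def suppRules : List (String × List String) :=
  [("BETA_DIKETONE",
      ["KETO_ENOL_ALIPHATIC", "CARBOXYLIC_ACID_ENOL", "ESTER_ENOL"]),
   ("AMIDE_IMIDIC_ACID",
      ["IMINE_ENAMINE_PRIMARY", "KETO_ENOL_ALIPHATIC", "IMINE_ENAMINE_SECONDARY", "AMIDE_ENOL"])]

-- result = set(matched); for category, suppressed in rules: if category in result: result.difference_update(suppressed)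
def apply_suppression_py (matched : List String) : List String :=
  suppRules.foldl
    (fun result rule =>
      if PySem.Set.contains result rule.1 then PySem.Set.diff result rule.2 else result)
    (PySem.Set.ofList matched)

-- ===== PORT B =====
-- _SUPPRESSORS: inverted index, suppressed category -> its dominant suppressors
def suppressorsTable : PySem.Dict String (List String) :=
  PySem.Dict.mk
    [("KETO_ENOL_ALIPHATIC", ["BETA_DIKETONE", "AMIDE_IMIDIC_ACID"]),
     ("CARBOXYLIC_ACID_ENOL", ["BETA_DIKETONE"]),
     ("ESTER_ENOL", ["BETA_DIKETONE"]),
     ("IMINE_ENAMINE_PRIMARY", ["AMIDE_IMIDIC_ACID"]),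
     ("IMINE_ENAMINE_SECONDARY", ["AMIDE_IMIDIC_ACID"]),
     ("AMIDE_ENOL", ["AMIDE_IMIDIC_ACID"])]

-- frozenset(c for c in matched if not any(d in matched for d in _SUPPRESSORS.get(c, ())))
def apply_suppression_py_alt (matched : List String) : List String :=
  PySem.Set.ofList (matched.filter (fun c =>
    !((suppressorsTable.getD c []).any (fun d => matched.contains d))))

-- ===== PRECONDITION & SPEC =====
def Spec_apply_suppression_py (matched : List String) (out : List String) : Prop := out = apply_suppression_py_alt matched
instance (matched : List String) (out : List String) : Decidable (Spec_apply_suppression_py matched out) := by unfold Spec_apply_suppression_py; infer_instance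

-- ===== CLAIM (what is proved, stated in full; the proofs are below) =====
def Claim_equal_apply_suppression_py : Prop := ∀ (matched : List String), Dom_apply_suppression_py matched → Spec_apply_suppression_py matched (apply_suppression_py matched)

-- ===== LEMMAS AND PROOFS =====

-- set(xs) commutes with filtering: building the set of a filtered list = filtering the set
theorem add_filter {α : Type} [BEq α] [LawfulBEq α] (p : α → Bool) (acc : List α) (x : α) :
    (PySem.Set.add acc x).filter p =
      if p x then PySem.Set.add (acc.filter p) x else acc.filter p := by
  by_cases hm : x ∈ acc
  · by_cases hp : p x = true
    · simp [PySem.Set.add, PySem.Set.contains, hm, hp, List.mem_filter]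
    · simp [PySem.Set.add, PySem.Set.contains, hm, hp]
  · by_cases hp : p x = true
    · simp [PySem.Set.add, PySem.Set.contains, hm, hp, List.mem_filter, List.filter_append]
    · simp [PySem.Set.add, PySem.Set.contains, hm, hp, List.filter_append]

theorem filter_foldl_add {α : Type} [BEq α] [LawfulBEq α] (p : α → Bool) :
    ∀ (l acc : List α),
      (l.foldl PySem.Set.add acc).filter p = (l.filter p).foldl PySem.Set.add (acc.filter p) := by
  intro l
  induction l with
  | nil => intro acc; simp
  | cons x l ih =>
    intro acc
    simp only [List.foldl_cons, List.filter_cons]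
    rw [ih, add_filter]
    by_cases hp : p x = true
    · simp [hp]
    · simp [hp]

theorem ofList_filter {α : Type} [BEq α] [LawfulBEq α] (p : α → Bool) (l : List α) :
    PySem.Set.ofList (l.filter p) = (PySem.Set.ofList l).filter p := by
  rw [PySem.Set.ofList_eq_foldl, PySem.Set.ofList_eq_foldl, filter_foldl_add]
  rfl

-- ===== VERDICT (by name: the statement is the Claim_ definition above) =====
theorem apply_suppression_py_spec : Claim_equal_apply_suppression_py := by
  intro matched _
  unfold Spec_apply_suppression_py apply_suppression_py apply_suppression_py_alt suppRules
  simp only [List.foldl_cons, List.foldl_nil]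
  rw [ofList_filter]
  by_cases h1 : "BETA_DIKETONE" ∈ matched <;> by_cases h2 : "AMIDE_IMIDIC_ACID" ∈ matched
  · simp only [PySem.Set.diff, PySem.Set.contains, List.contains_eq_mem,
        PySem.Set.mem_ofList, List.mem_filter, List.mem_cons, List.not_mem_nil,
        String.reduceEq, or_false, or_self, and_true,
        h1, h2, decide_true, decide_false, List.filter_filter,
        if_true, if_false, Bool.false_eq_true, Bool.not_false, and_self]
    symm; apply List.filter_congr; intro c _
    simp only [suppressorsTable, PySem.Dict.getD, PySem.Dict.get?_mk_cons]
    split_ifs <;> simp_all [PySem.Dict.get?] <;> aesop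
  · simp only [PySem.Set.diff, PySem.Set.contains, List.contains_eq_mem,
        PySem.Set.mem_ofList, List.mem_filter, List.mem_cons, List.not_mem_nil,
        String.reduceEq, or_false, or_self, and_true,
        h1, h2, decide_true, decide_false, List.filter_filter,
        if_true, if_false, Bool.false_eq_true, Bool.not_false, and_self]
    symm; apply List.filter_congr; intro c _
    simp only [suppressorsTable, PySem.Dict.getD, PySem.Dict.get?_mk_cons]
    split_ifs <;> simp_all [PySem.Dict.get?] <;> aesop
  · simp only [PySem.Set.diff, PySem.Set.contains, List.contains_eq_mem,
        PySem.Set.mem_ofList, List.mem_filter, List.mem_cons, List.not_mem_nil,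
        String.reduceEq, or_false, or_self, and_true,
        h1, h2, decide_true, decide_false, List.filter_filter,
        if_true, if_false, Bool.false_eq_true, Bool.not_false, and_self]
    symm; apply List.filter_congr; intro c _
    simp only [suppressorsTable, PySem.Dict.getD, PySem.Dict.get?_mk_cons]
    split_ifs <;> simp_all [PySem.Dict.get?] <;> aesop
  · simp only [PySem.Set.diff, PySem.Set.contains, List.contains_eq_mem,
        PySem.Set.mem_ofList, List.mem_filter, List.mem_cons, List.not_mem_nil,
        String.reduceEq, or_false, or_self, and_true,
        h1, h2, decide_true, decide_false, List.filter_filter,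
        if_true, if_false, Bool.false_eq_true, Bool.not_false, and_self]
    symm; rw [List.filter_eq_self]; intro c _
    simp only [suppressorsTable, PySem.Dict.getD, PySem.Dict.get?_mk_cons]
    split_ifs <;> simp_all [PySem.Dict.get?] <;> aesop
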